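-- pv_equiv track=rewrite | github.com/nadakhelif/CP-Problems | B problems/night_and_board.py | bfs
-- ===== SOURCE A (Python) =====
-- from collections import deque
--
-- def get_moves(x, y, a, b, n):
--     moves = [
--         (x+a, y+b), (x+a, y-b), (x-a, y+b), (x-a, y-b),
--         (x+b, y+a), (x+b, y-a), (x-b, y+a), (x-b, y-a)
--     ]
--     return [(x, y) for x, y in moves if 0 <= x < n and 0 <= y < n]
--
-- def bfs(a, b, n):
--     queue = deque([(0, 0, 0)])  # (x, y, moves)
--     visited = set([(0, 0)])
--
--     while queue:
--         x, y, moves = queue.popleft()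
--
--         if x == n-1 and y == n-1:
--             return moves
--
--         for nx, ny in get_moves(x, y, a, b, n):
--             if (nx, ny) not in visited:
--                 visited.add((nx, ny))
--                 queue.append((nx, ny, moves + 1))
--
--     return -1
-- ===== SOURCE B (Python) =====
-- def get_moves(x, y, a, b, n):
--     moves = [
--         (x+a, y+b), (x+a, y-b), (x-a, y+b), (x-a, y-b),
--         (x+b, y+a), (x+b, y-a), (x-b, y+a), (x-b, y-a)
--     ]
--     return [(x, y) for x, y in moves if 0 <= x < n and 0 <= y < n]
--
-- def bfs(a, b, n):
--     # Level-synchronous BFS: expand whole frontiers, counting levels.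
--     frontier = [(0, 0)]
--     visited = {(0, 0)}
--     dist = 0
--     while frontier:
--         if (n - 1, n - 1) in frontier:
--             return dist
--         nxt = []
--         for x, y in frontier:
--             for c in get_moves(x, y, a, b, n):
--                 if c not in visited:
--                     visited.add(c)
--                     nxt.append(c)
--         frontier = nxt
--         dist += 1
--     return -1
-- ===== Notes on version B (the rewrite author's own statement) =====
-- stated objective: alternative
-- what changed: Replaced the single FIFO queue of (x, y, dist) triples with a level-synchronous BFS: an outer loop over whole frontier lists with one distance counter, so no per-node distance bookkeeping and no deque.
import Mathlib
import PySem

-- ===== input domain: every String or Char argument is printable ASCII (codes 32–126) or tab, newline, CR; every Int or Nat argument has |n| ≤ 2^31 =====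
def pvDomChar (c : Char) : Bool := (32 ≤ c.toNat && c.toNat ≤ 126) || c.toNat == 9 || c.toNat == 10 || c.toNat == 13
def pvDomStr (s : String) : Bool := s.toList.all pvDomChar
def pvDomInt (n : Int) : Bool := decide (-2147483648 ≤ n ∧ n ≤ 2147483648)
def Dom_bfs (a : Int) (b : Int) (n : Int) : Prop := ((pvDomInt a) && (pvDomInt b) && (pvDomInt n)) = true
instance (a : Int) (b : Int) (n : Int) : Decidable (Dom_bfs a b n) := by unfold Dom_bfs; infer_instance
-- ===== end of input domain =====

-- B replaces A's single FIFO queue of (x, y, dist) triples by a level-synchronous BFS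
-- (whole-frontier expansion with one distance counter); same return value, no speed claim.

-- ===== PORT A =====
-- get_moves(x, y, a, b, n): the 8 candidate cells filtered by the board-bounds check
def getMoves (x y a b n : Int) : List (Int × Int) :=
  ([(x+a,y+b), (x+a,y-b), (x-a,y+b), (x-a,y-b),
    (x+b,y+a), (x+b,y-a), (x-b,y+a), (x-b,y-a)] : List (Int × Int)).filter
    (fun c => decide (0 ≤ c.1 ∧ c.1 < n ∧ 0 ≤ c.2 ∧ c.2 < n))

-- A's while loop; the Nat fuel is only a totality guard (each iteration pops one queue
-- entry and every push marks a fresh board cell visited, so n²+2 iterations suffice —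
-- exactly what the equivalence proof below establishes).
def bfsLoopA (a b n : Int) : Nat → List (Int × Int × Int) → PySem.Set (Int × Int) → Int
  | 0, _, _ => -1
  | _+1, [], _ => -1
  | f+1, (x, y, m) :: rest, vis =>
    if x = n - 1 ∧ y = n - 1 then m
    else
      let s := (getMoves x y a b n).foldl
        (fun (st : List (Int × Int × Int) × PySem.Set (Int × Int)) c =>
          if c ∈ st.2 then st else (st.1 ++ [(c.1, c.2, m + 1)], PySem.Set.add st.2 c))
        (rest, vis)
      bfsLoopA a b n f s.1 s.2

def bfs (a : Int) (b : Int) (n : Int) : Int :=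
  bfsLoopA a b n (n.toNat * n.toNat + 2) [(0, 0, 0)] (PySem.Set.ofList [(0, 0)])

-- ===== PORT B =====
-- one level: for (x,y) in frontier: for c in get_moves(...): if c not in visited: mark and collect
def expandLevel (a b n : Int) (frontier : List (Int × Int))
    (st : List (Int × Int) × PySem.Set (Int × Int)) :
    List (Int × Int) × PySem.Set (Int × Int) :=
  frontier.foldl (fun st c =>
    (getMoves c.1 c.2 a b n).foldl
      (fun st m => if m ∈ st.2 then st else (st.1 ++ [m], PySem.Set.add st.2 m)) st) st

-- B's while loop over whole frontiers; fuel is the same totality guard (one level per unit)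
def bfsLoopB (a b n : Int) : Nat → List (Int × Int) → PySem.Set (Int × Int) → Int → Int
  | 0, _, _, _ => -1
  | f+1, frontier, vis, d =>
    if frontier = [] then -1
    else if (n - 1, n - 1) ∈ frontier then d
    else
      let s := expandLevel a b n frontier ([], vis)
      bfsLoopB a b n f s.1 s.2 (d + 1)

def bfs_alt (a : Int) (b : Int) (n : Int) : Int :=
  bfsLoopB a b n (n.toNat * n.toNat + 2) [(0, 0)] (PySem.Set.ofList [(0, 0)]) 0

-- ===== PRECONDITION & SPEC =====
def Spec_bfs (a : Int) (b : Int) (n : Int) (out : Int) : Prop := out = bfs_alt a b n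
instance (a : Int) (b : Int) (n : Int) (out : Int) : Decidable (Spec_bfs a b n out) := by unfold Spec_bfs; infer_instance

-- ===== CLAIM (what is proved, stated in full; the proofs are below) =====
def Claim_equal_bfs : Prop := ∀ (a : Int) (b : Int) (n : Int), Dom_bfs a b n → Spec_bfs a b n (bfs a b n)

-- ===== LEMMAS AND PROOFS =====

/-- attach a distance to a cell, as A's queue stores it -/
def withD (d : Int) (c : Int × Int) : Int × Int × Int := (c.1, c.2, d)

/-- the cell lies on the n×n board -/
def inGrid (n : Int) (c : Int × Int) : Prop := 0 ≤ c.1 ∧ c.1 < n ∧ 0 ≤ c.2 ∧ c.2 < n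

lemma mem_getMoves {x y a b n : Int} {c : Int × Int} (h : c ∈ getMoves x y a b n) :
    inGrid n c := by
  have := (List.mem_filter.mp h).2
  unfold inGrid
  exact of_decide_eq_true this

/-- A's inner push loop, viewed through B's: the queue tail of still-unprocessed level-d
entries is untouched and the appended (·,·,dd) entries are exactly B's collected cells. -/
lemma innerRel (dd : Int) (ms : List (Int × Int)) :
    ∀ (q0 : List (Int × Int × Int)) (acc : List (Int × Int)) (vis : PySem.Set (Int × Int)),
    ms.foldl (fun (st : List (Int × Int × Int) × PySem.Set (Int × Int)) c =>
        if c ∈ st.2 then st else (st.1 ++ [(c.1, c.2, dd)], PySem.Set.add st.2 c))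
      (q0 ++ acc.map (withD dd), vis)
    = (q0 ++ ((ms.foldl (fun (st : List (Int × Int) × PySem.Set (Int × Int)) m =>
          if m ∈ st.2 then st else (st.1 ++ [m], PySem.Set.add st.2 m)) (acc, vis)).1).map (withD dd),
       (ms.foldl (fun (st : List (Int × Int) × PySem.Set (Int × Int)) m =>
          if m ∈ st.2 then st else (st.1 ++ [m], PySem.Set.add st.2 m)) (acc, vis)).2) := by
  induction ms with
  | nil => intro q0 acc vis; simp
  | cons m ms ih =>
    intro q0 acc vis
    simp only [List.foldl_cons]
    by_cases hm : m ∈ vis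
    · simpa [hm] using ih q0 acc vis
    · have h1 : (q0 ++ acc.map (withD dd)) ++ [(m.1, m.2, dd)]
          = q0 ++ (acc ++ [m]).map (withD dd) := by
        simp [withD]
      simpa [hm, h1] using ih q0 (acc ++ [m]) (PySem.Set.add vis m)

/-- level decomposition of A's loop: processing the remainder of a level equals checking the
target against it and then continuing one level deeper with B's expansion of it. -/
lemma levelRel (a b n d : Int) (rest : List (Int × Int)) :
    ∀ (f : Nat) (acc : List (Int × Int)) (vis : PySem.Set (Int × Int)),
    bfsLoopA a b n (rest.length + f) (rest.map (withD d) ++ acc.map (withD (d+1))) vis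
    = if (n-1, n-1) ∈ rest then d
      else bfsLoopA a b n f ((expandLevel a b n rest (acc, vis)).1.map (withD (d+1)))
             (expandLevel a b n rest (acc, vis)).2 := by
  induction rest with
  | nil =>
    intro f acc vis
    simp [expandLevel]
  | cons c rest ih =>
    intro f acc vis
    have hfuel : (c :: rest).length + f = (rest.length + f) + 1 := by simp [List.length_cons]; omega
    rw [hfuel]
    by_cases hc : c.1 = n - 1 ∧ c.2 = n - 1
    · have hmem : ((n : Int) - 1, (n : Int) - 1) ∈ c :: rest := by
        obtain ⟨x, y⟩ := c
        obtain ⟨hx, hy⟩ := hc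
        simp_all
      simp [bfsLoopA, withD, hc, hmem]
    · have hcne : ((n : Int) - 1, (n : Int) - 1) ≠ c := by
        intro h; apply hc; rw [← h]; exact ⟨rfl, rfl⟩
      have hexp : expandLevel a b n (c :: rest) (acc, vis)
          = expandLevel a b n rest ((getMoves c.1 c.2 a b n).foldl
              (fun (st : List (Int × Int) × PySem.Set (Int × Int)) m =>
                if m ∈ st.2 then st else (st.1 ++ [m], PySem.Set.add st.2 m)) (acc, vis)) := rfl
      simp only [List.map_cons, List.cons_append]
      have hw : withD d c = (c.1, c.2, d) := rfl
      rw [hw]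
      simp only [bfsLoopA]
      rw [if_neg hc]
      rw [innerRel (d + 1) (getMoves c.1 c.2 a b n) (rest.map (withD d)) acc vis]
      rw [ih f]
      rw [hexp]
      simp [List.mem_cons, hcne]

/-- bookkeeping facts about the inner push loop over a move list of board cells -/
lemma foldBFacts (n : Int) (ms : List (Int × Int)) (hms : ∀ m ∈ ms, inGrid n m) :
    ∀ (acc : List (Int × Int)) (vis : PySem.Set (Int × Int)), vis.Nodup →
    (ms.foldl (fun (st : List (Int × Int) × PySem.Set (Int × Int)) m =>
        if m ∈ st.2 then st else (st.1 ++ [m], PySem.Set.add st.2 m)) (acc, vis)).2.Nodup ∧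
    (ms.foldl (fun (st : List (Int × Int) × PySem.Set (Int × Int)) m =>
        if m ∈ st.2 then st else (st.1 ++ [m], PySem.Set.add st.2 m)) (acc, vis)).2.length + acc.length
      = vis.length + (ms.foldl (fun (st : List (Int × Int) × PySem.Set (Int × Int)) m =>
        if m ∈ st.2 then st else (st.1 ++ [m], PySem.Set.add st.2 m)) (acc, vis)).1.length ∧
    (∀ c ∈ (ms.foldl (fun (st : List (Int × Int) × PySem.Set (Int × Int)) m =>
        if m ∈ st.2 then st else (st.1 ++ [m], PySem.Set.add st.2 m)) (acc, vis)).2,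
      c ∈ vis ∨ inGrid n c) := by
  induction ms with
  | nil =>
    intro acc vis hnd
    exact ⟨hnd, by simp, fun c hc => Or.inl hc⟩
  | cons m ms ih =>
    intro acc vis hnd
    have hmg : inGrid n m := hms m (List.mem_cons_self ..)
    have hms' : ∀ x ∈ ms, inGrid n x := fun x hx => hms x (List.mem_cons_of_mem _ hx)
    simp only [List.foldl_cons]
    by_cases hm : m ∈ vis
    · simpa [hm] using ih hms' acc vis hnd
    · have hadd : PySem.Set.add vis m = vis ++ [m] := PySem.Set.add_of_not_mem hm
      have hnd' : (PySem.Set.add vis m).Nodup := PySem.Set.nodup_add vis m hnd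
      obtain ⟨h1, h2, h3⟩ := ih hms' (acc ++ [m]) (PySem.Set.add vis m) hnd'
      refine ⟨?_, ?_, ?_⟩
      · simpa [hm] using h1
      · simp only [hm, ite_false]
        simp only [hadd] at h2 ⊢
        simp at h2 ⊢
        omega
      · intro c hc
        simp only [hm, ite_false] at hc
        rcases h3 c hc with h | h
        · rw [hadd] at h
          rcases List.mem_append.mp h with h | h
          · exact Or.inl h
          · simp at h; subst h; exact Or.inr hmg
        · exact Or.inr h

/-- bookkeeping facts about one level expansion -/
lemma expandFacts (a b n : Int) (frontier : List (Int × Int)) :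
    ∀ (acc : List (Int × Int)) (vis : PySem.Set (Int × Int)), vis.Nodup →
    (expandLevel a b n frontier (acc, vis)).2.Nodup ∧
    (expandLevel a b n frontier (acc, vis)).2.length + acc.length
      = vis.length + (expandLevel a b n frontier (acc, vis)).1.length ∧
    (∀ c ∈ (expandLevel a b n frontier (acc, vis)).2, c ∈ vis ∨ inGrid n c) := by
  induction frontier with
  | nil =>
    intro acc vis hnd
    exact ⟨hnd, by simp [expandLevel], fun c hc => Or.inl hc⟩
  | cons c rest ih =>
    intro acc vis hnd
    have hmoves : ∀ m ∈ getMoves c.1 c.2 a b n, inGrid n m := fun m hm => mem_getMoves hm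
    obtain ⟨h1, h2, h3⟩ := foldBFacts n (getMoves c.1 c.2 a b n) hmoves acc vis hnd
    have hexp : expandLevel a b n (c :: rest) (acc, vis)
        = expandLevel a b n rest ((getMoves c.1 c.2 a b n).foldl
            (fun (st : List (Int × Int) × PySem.Set (Int × Int)) m =>
              if m ∈ st.2 then st else (st.1 ++ [m], PySem.Set.add st.2 m)) (acc, vis)) := rfl
    obtain ⟨g1, g2, g3⟩ := ih ((getMoves c.1 c.2 a b n).foldl
            (fun (st : List (Int × Int) × PySem.Set (Int × Int)) m =>
              if m ∈ st.2 then st else (st.1 ++ [m], PySem.Set.add st.2 m)) (acc, vis)).1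
        ((getMoves c.1 c.2 a b n).foldl
            (fun (st : List (Int × Int) × PySem.Set (Int × Int)) m =>
              if m ∈ st.2 then st else (st.1 ++ [m], PySem.Set.add st.2 m)) (acc, vis)).2 h1
    simp only [Prod.mk.eta] at g1 g2 g3
    rw [hexp]
    refine ⟨g1, by omega, ?_⟩
    intro x hx
    rcases g3 x hx with h | h
    · rcases h3 x h with h' | h'
      · exact Or.inl h'
      · exact Or.inr h'
    · exact Or.inr h

/-- a nodup list of board cells (plus possibly the start) has at most n²+1 elements -/
lemma visBound (n : Int) (vis : List (Int × Int)) (hnd : vis.Nodup)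
    (h : ∀ c ∈ vis, inGrid n c ∨ c = (0, 0)) :
    vis.length ≤ n.toNat * n.toNat + 1 := by
  classical
  set grid : List (Int × Int) :=
    ((List.range n.toNat).flatMap (fun i => (List.range n.toNat).map (fun j => ((i : Int), (j : Int)))))
      ++ [(0, 0)] with hgrid
  have hsub : ∀ c ∈ vis, c ∈ grid := by
    intro c hc
    rcases h c hc with ⟨h1, h2, h3, h4⟩ | rfl
    · rw [hgrid]
      refine List.mem_append.mpr (Or.inl ?_)
      have e1 : (c.1.toNat : Int) = c.1 := Int.toNat_of_nonneg h1
      have e2 : (c.2.toNat : Int) = c.2 := Int.toNat_of_nonneg h3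
      have hi : c.1.toNat < n.toNat := by omega
      have hj : c.2.toNat < n.toNat := by omega
      simp
      exact ⟨c.1.toNat, by omega, c.2.toNat, by omega, by rw [e1, e2]⟩
    · simp [hgrid]
  have hlen : grid.length = n.toNat * n.toNat + 1 := by
    simp [hgrid, List.length_flatMap]
  calc vis.length = vis.toFinset.card := (List.toFinset_card_of_nodup hnd).symm
    _ ≤ grid.toFinset.card := Finset.card_le_card (by
          intro c hc
          exact List.mem_toFinset.mpr (hsub c (List.mem_toFinset.mp hc)))
    _ ≤ grid.length := List.toFinset_card_le grid
    _ = n.toNat * n.toNat + 1 := hlen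

/-- main simulation: with sufficient fuel on both sides, A's queue loop started on a whole
level equals B's level loop. -/
lemma mainRel (a b n : Int) :
    ∀ (fB fA : Nat) (frontier : List (Int × Int)) (vis : PySem.Set (Int × Int)) (d : Int),
    vis.Nodup → (∀ c ∈ vis, inGrid n c ∨ c = (0, 0)) →
    frontier.length + (n.toNat * n.toNat + 1 - vis.length) + 1 ≤ fA →
    (n.toNat * n.toNat + 1 - vis.length) + 2 ≤ fB →
    bfsLoopA a b n fA (frontier.map (withD d)) vis = bfsLoopB a b n fB frontier vis d := by
  intro fB
  induction fB with
  | zero =>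
    intro fA frontier vis d hnd hin hA hB
    omega
  | succ fB ih =>
    intro fA frontier vis d hnd hin hA hB
    by_cases hfr : frontier = []
    · subst hfr
      obtain ⟨fA', rfl⟩ : ∃ k, fA = k + 1 := ⟨fA - 1, by omega⟩
      simp [bfsLoopA, bfsLoopB]
    · have hflen : 1 ≤ frontier.length := List.length_pos_iff.mpr hfr
      obtain ⟨fA', rfl⟩ : ∃ k, fA = frontier.length + k := ⟨fA - frontier.length, by omega⟩
      have hlevel := levelRel a b n d frontier fA' [] vis
      simp only [List.map_nil, List.append_nil] at hlevel
      rw [hlevel]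
      simp only [bfsLoopB]
      rw [if_neg hfr]
      obtain ⟨h1, h2, h3⟩ := expandFacts a b n frontier [] vis hnd
      simp only [List.length_nil, Nat.add_zero] at h2
      by_cases hmem : ((n : Int) - 1, (n : Int) - 1) ∈ frontier
      · simp [hmem]
      · rw [if_neg hmem, if_neg hmem]
        have hin' : ∀ c ∈ (expandLevel a b n frontier ([], vis)).2, inGrid n c ∨ c = (0, 0) := by
          intro c hc
          rcases h3 c hc with h | h
          · exact hin c h
          · exact Or.inl h
        have hbound := visBound n (expandLevel a b n frontier ([], vis)).2 h1 hin'
        by_cases hnew : (expandLevel a b n frontier ([], vis)).1 = []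
        · rw [hnew]
          have hnl : (expandLevel a b n frontier ([], vis)).1.length = 0 := by rw [hnew]; rfl
          obtain ⟨k, rfl⟩ : ∃ k, fA' = k + 1 := ⟨fA' - 1, by omega⟩
          obtain ⟨k2, hk2⟩ : ∃ k2, fB = k2 + 1 := ⟨fB - 1, by omega⟩
          rw [hk2]
          simp [bfsLoopA, bfsLoopB]
        · have hnlen : 1 ≤ (expandLevel a b n frontier ([], vis)).1.length :=
            List.length_pos_iff.mpr hnew
          exact ih fA' (expandLevel a b n frontier ([], vis)).1
            (expandLevel a b n frontier ([], vis)).2 (d + 1) h1 hin' (by omega) (by omega)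

-- ===== VERDICT (by name: the statement is the Claim_ definition above) =====
theorem bfs_spec : Claim_equal_bfs := by
  intro a b n _
  show bfs a b n = bfs_alt a b n
  unfold bfs bfs_alt
  have hv : PySem.Set.ofList [(((0 : Int)), ((0 : Int)))] = [((0 : Int), (0 : Int))] := rfl
  rw [hv]
  have e : ([(((0 : Int)), ((0 : Int)))].map (withD 0)) = [((0 : Int), (0 : Int), (0 : Int))] := rfl
  rw [← e]
  refine mainRel a b n (n.toNat * n.toNat + 2) (n.toNat * n.toNat + 2)
    [((0 : Int), (0 : Int))] [((0 : Int), (0 : Int))] 0 (by simp) ?_ ?_ ?_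
  · intro c hc
    simp at hc
    subst hc
    exact Or.inr rfl
  · simp
    omega
  · simp
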